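-- pv_equiv track=rewrite | github.com/mbkloster/platopus | Utility.py | wildcardHostname
-- ===== SOURCE A (Python) =====
-- def wildcardHostname(hostname, unwildcardedNums = 3):
-- 	# converts hostnames into wildcarded hostnames
-- 	numbersEncountered = 0;
-- 	numberBegin = -1;
-- 	i = 0;
-- 	while (i < len(hostname)):
-- 		c = hostname[i];
-- 		if (numberBegin < 0):
-- 			if (c == "1" or c == "2" or c == "3" or c == "4" or c == "5" or c == "6" or c == "7" or c == "8" or c == "9" or c == "0"):
-- 				numberBegin = i;
-- 		else:
-- 			if (c == "1" or c == "2" or c == "3" or c == "4" or c == "5" or c == "6" or c == "7" or c == "8" or c == "9" or c == "0"):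
-- 				pass;
-- 			else:
-- 				if (numbersEncountered >= unwildcardedNums):
-- 					difference = i-numberBegin;
-- 					hostname = hostname[0:numberBegin] + "*" + hostname[i:];
-- 					i -= difference;
-- 				numberBegin = -1;
-- 				numbersEncountered += 1;
-- 		i += 1;
-- 	if (numberBegin >= 0):
-- 		hostname = hostname[0:numberBegin]+"*";
-- 	return hostname;
-- ===== SOURCE B (Python) =====
-- def wildcardHostname(hostname, unwildcardedNums = 3):
-- 	# Single pass: collect output pieces in a list, counting completed digit runs; join once at the end.
-- 	parts = []
-- 	run = ""
-- 	runs = 0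
-- 	for c in hostname:
-- 		if c in "0123456789":
-- 			run += c
-- 		else:
-- 			if run:
-- 				parts.append(run if runs < unwildcardedNums else "*")
-- 				runs += 1
-- 				run = ""
-- 			parts.append(c)
-- 	if run:
-- 		parts.append("*")
-- 	return "".join(parts)
-- ===== Notes on version B (the rewrite author's own statement) =====
-- stated objective: faster
-- what changed: A repeatedly splices the hostname string in place and rescans from the splice point (quadratic string rebuilding); B makes one pass over the characters, buffering the current digit run and appending finished pieces to a list that is joined once at the end.
import Mathlib
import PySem

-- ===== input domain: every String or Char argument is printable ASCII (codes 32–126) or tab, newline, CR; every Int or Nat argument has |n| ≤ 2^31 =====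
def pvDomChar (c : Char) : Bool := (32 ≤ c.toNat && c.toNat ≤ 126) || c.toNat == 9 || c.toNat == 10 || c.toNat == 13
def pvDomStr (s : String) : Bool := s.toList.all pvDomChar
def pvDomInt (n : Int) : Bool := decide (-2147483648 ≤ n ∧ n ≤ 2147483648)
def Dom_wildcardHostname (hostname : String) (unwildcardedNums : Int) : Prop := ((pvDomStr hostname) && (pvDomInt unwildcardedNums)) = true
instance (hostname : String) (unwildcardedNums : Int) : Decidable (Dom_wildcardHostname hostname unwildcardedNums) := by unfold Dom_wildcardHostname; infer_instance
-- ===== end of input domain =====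

-- B replaces A's repeated in-place string splicing by one pass that collects pieces in a list and joins once.

-- ===== PORT A =====
-- A's digit test: the literal chain c == "1" or … or c == "0"
def pvIsDigA (c : Char) : Bool :=
  c = '1' || c = '2' || c = '3' || c = '4' || c = '5' || c = '6' || c = '7' || c = '8' || c = '9' || c = '0'

-- A's while loop, state = (hostname chars, numbersEncountered, numberBegin, i);
-- fuel is only a totality guard: 2*length is always enough (pvLoopA_spec below is applied at that fuel).
def pvLoopA (u : Int) : Nat → List Char → Int → Int → Int → List Char
  | 0, s, _, _, _ => s
  | fuel+1, s, ne, nb, i =>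
    if i < (s.length : Int) then
      let c := (PySem.List.pyGet? s i).getD ' '   -- i is always in range when 0 ≤ i < len, as here
      if nb < 0 then
        if pvIsDigA c then pvLoopA u fuel s ne i (i+1)
        else pvLoopA u fuel s ne nb (i+1)
      else
        if pvIsDigA c then pvLoopA u fuel s ne nb (i+1)
        else
          if ne ≥ u then
            let diff := i - nb
            let s' := PySem.List.slice s (some 0) (some nb) ++ ['*'] ++ PySem.List.slice s (some i) none
            pvLoopA u fuel s' (ne+1) (-1) ((i - diff) + 1)
          else pvLoopA u fuel s (ne+1) (-1) (i+1)
    else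
      if nb ≥ 0 then PySem.List.slice s (some 0) (some nb) ++ ['*'] else s

def wildcardHostname (hostname : String) (unwildcardedNums : Int) : String :=
  String.mk (pvLoopA unwildcardedNums (2 * hostname.toList.length) hostname.toList 0 (-1) 0)

-- ===== PORT B =====
-- B's digit test: c in "0123456789"
def pvIsDigB (c : Char) : Bool := ("0123456789".toList).contains c

-- one step of B's for-loop; state = (parts, run, runs)
def pvStepB (u : Int) (st : List (List Char) × List Char × Int) (c : Char) :
    List (List Char) × List Char × Int :=
  let (parts, run, runs) := st
  if pvIsDigB c then (parts, run ++ [c], runs)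
  else if run ≠ [] then
    (parts ++ [(if runs < u then run else ['*']), [c]], [], runs + 1)
  else (parts ++ [[c]], run, runs)

def wildcardHostname_alt (hostname : String) (unwildcardedNums : Int) : String :=
  let st := hostname.toList.foldl (pvStepB unwildcardedNums) ([], [], 0)
  let parts := if st.2.1 ≠ [] then st.1 ++ [['*']] else st.1
  String.mk parts.flatten

-- ===== PRECONDITION & SPEC =====
def Spec_wildcardHostname (hostname : String) (unwildcardedNums : Int) (out : String) : Prop := out = wildcardHostname_alt hostname unwildcardedNums
instance (hostname : String) (unwildcardedNums : Int) (out : String) : Decidable (Spec_wildcardHostname hostname unwildcardedNums out) := by unfold Spec_wildcardHostname; infer_instance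

-- ===== CLAIM (what is proved, stated in full; the proofs are below) =====
def Claim_equal_wildcardHostname : Prop := ∀ (hostname : String) (unwildcardedNums : Int), Dom_wildcardHostname hostname unwildcardedNums → Spec_wildcardHostname hostname unwildcardedNums (wildcardHostname hostname unwildcardedNums)

-- ===== LEMMAS AND PROOFS =====

-- common description of both programs, by recursion on the unprocessed suffix:
-- pvTp = scanning outside a digit run (ne completed runs so far),
-- pvRr = scanning inside the run d; a trailing run always becomes '*',
-- an inner run is kept for the first u completed runs, '*' afterwards.
mutual
def pvTp (u ne : Int) : List Char → List Char
  | [] => []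
  | c :: t => if pvIsDigA c then pvRr u ne [c] t else c :: pvTp u ne t
def pvRr (u ne : Int) (d : List Char) : List Char → List Char
  | [] => ['*']
  | c :: t => if pvIsDigA c then pvRr u ne (d ++ [c]) t
              else (if ne < u then d else ['*']) ++ c :: pvTp u (ne+1) t
end

lemma pvIsDig_eq (c : Char) : pvIsDigB c = pvIsDigA c := by
  simp [pvIsDigB, pvIsDigA]
  ac_rfl

-- A's loop computes pvTp/pvRr: p = finalized prefix, t = unprocessed suffix, d = current run.
-- Fuel 2*|t| (resp. |d| + 2*|t|) suffices: a splice shortens the string by |d| ≥ 1 while i falls back by the same amount.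
lemma pvLoopA_spec (u : Int) : ∀ fuel : Nat,
    (∀ (p t : List Char) (ne : Int), 2 * t.length ≤ fuel →
      pvLoopA u fuel (p ++ t) ne (-1) (p.length : Int) = p ++ pvTp u ne t)
    ∧ (∀ (p d t : List Char) (ne : Int), d ≠ [] → d.length + 2 * t.length ≤ fuel →
      pvLoopA u fuel (p ++ (d ++ t)) ne (p.length : Int) ((p.length : Int) + (d.length : Int))
        = p ++ pvRr u ne d t) := by
  intro fuel
  induction fuel with
  | zero =>
    constructor
    · intro p t ne h
      have ht : t = [] := by
        cases t with
        | nil => rfl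
        | cons c t' => simp at h
      subst ht
      simp [pvLoopA, pvTp]
    · intro p d t ne hd h
      exfalso
      cases d with
      | nil => exact hd rfl
      | cons c d' => simp at h
  | succ n ih =>
    obtain ⟨ih1, ih2⟩ := ih
    constructor
    · -- free case (numberBegin = -1)
      intro p t ne h
      cases t with
      | nil => simp [pvLoopA, pvTp]
      | cons c t' =>
        rw [pvLoopA]
        rw [if_pos (by simp)]
        simp only [PySem.List.pyGet?_append_length, Option.getD_some]
        rw [if_pos (by omega : (-1:Int) < 0)]
        by_cases hc : pvIsDigA c
        · rw [if_pos hc]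
          have h2 := ih2 p [c] t' ne (by simp) (by simp at h ⊢; omega)
          simp only [List.singleton_append, List.length_cons, List.length_nil,
            Nat.cast_one, zero_add] at h2
          rw [h2]
          simp [pvTp, hc]
        · rw [if_neg hc]
          have h1 := ih1 (p ++ [c]) t' ne (by simp at h ⊢; omega)
          simp only [List.append_assoc, List.singleton_append, List.length_append,
            List.length_cons, List.length_nil, Nat.cast_add, Nat.cast_one,
            zero_add] at h1
          rw [h1]
          simp [pvTp, hc]
    · -- run case (numberBegin = p.length, current run d)
      intro p d t ne hd h
      cases t with
      | nil =>
        rw [pvLoopA]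
        rw [if_neg (by simp)]
        rw [if_pos (by omega : (p.length : Int) ≥ 0)]
        rw [PySem.List.slice_zero_start, PySem.List.slice_to_natCast]
        simp [pvRr, List.take_left']
      | cons c t' =>
        rw [pvLoopA]
        rw [if_pos (by simp)]
        have hget : PySem.List.pyGet? (p ++ (d ++ c :: t')) ((p.length : Int) + (d.length : Int))
            = some c := by
          rw [show (p ++ (d ++ c :: t')) = ((p ++ d) ++ c :: t') by simp]
          rw [show ((p.length : Int) + (d.length : Int)) = (((p ++ d).length : Nat) : Int) by simp]
          exact PySem.List.pyGet?_append_length (p ++ d) t' c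
        simp only [hget, Option.getD_some]
        rw [if_neg (by omega : ¬ (p.length : Int) < 0)]
        by_cases hc : pvIsDigA c
        · rw [if_pos hc]
          have h2 := ih2 p (d ++ [c]) t' ne (by simp) (by simp at h ⊢; omega)
          simp only [List.append_assoc, List.singleton_append, List.length_append,
            List.length_cons, List.length_nil, Nat.cast_add, Nat.cast_one,
            zero_add] at h2
          rw [show ((p.length : Int) + (d.length : Int) + 1) = (p.length : Int) + ((d.length : Int) + 1) by ring]
          rw [h2]
          simp [pvRr, hc]
        · rw [if_neg hc]
          by_cases hne : ne ≥ u
          · rw [if_pos hne]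
            -- splice: s' = p ++ ['*'] ++ (c :: t')
            have hs1 : PySem.List.slice (p ++ (d ++ c :: t')) (some 0) (some (p.length : Int)) = p := by
              rw [PySem.List.slice_zero_start, PySem.List.slice_to_natCast]
              simp [List.take_left']
            have hs2 : PySem.List.slice (p ++ (d ++ c :: t')) (some ((p.length : Int) + (d.length : Int))) none = c :: t' := by
              rw [show ((p.length : Int) + (d.length : Int)) = (((p.length + d.length : Nat) : Int)) by push_cast; ring]
              rw [PySem.List.slice_from_natCast]
              rw [show (p ++ (d ++ c :: t')) = ((p ++ d) ++ c :: t') by simp]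
              rw [show p.length + d.length = (p ++ d).length by simp]
              exact List.drop_left
            rw [hs1, hs2]
            have h1 := ih1 (p ++ ['*']) (c :: t') (ne + 1) (by simp at h ⊢; cases d with | nil => exact absurd rfl hd | cons a d' => simp at h; omega)
            simp only [List.append_assoc, List.singleton_append, List.length_append,
              List.length_cons, List.length_nil, Nat.cast_add, Nat.cast_one,
              zero_add] at h1
            rw [show ((p.length : Int) + (d.length : Int) - ((p.length : Int) + (d.length : Int) - (p.length : Int)) + 1) = (p.length : Int) + 1 by ring]
            simp only [List.append_assoc, List.singleton_append] at h1 ⊢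
            rw [h1]
            simp [pvRr, pvTp, hc, show ¬ ne < u by omega]
          · rw [if_neg hne]
            have h1 := ih1 (p ++ d ++ [c]) t' (ne + 1) (by simp at h ⊢; omega)
            simp only [List.append_assoc, List.singleton_append, List.length_append,
              List.length_cons, List.length_nil, Nat.cast_add, Nat.cast_one,
              zero_add] at h1
            rw [show ((p.length : Int) + (d.length : Int) + 1) = (p.length : Int) + ((d.length : Int) + 1) by ring]
            rw [h1]
            simp [pvRr, hc, show ne < u by omega]

-- B's fold computes pvTp/pvRr with the same meaning of parts (finalized pieces), run, runs.
lemma pvFoldB_spec (u : Int) : ∀ (t : List Char) (parts : List (List Char)) (run : List Char) (runs : Int),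
    (if (t.foldl (pvStepB u) (parts, run, runs)).2.1 ≠ [] then
        (t.foldl (pvStepB u) (parts, run, runs)).1 ++ [['*']]
      else (t.foldl (pvStepB u) (parts, run, runs)).1).flatten
    = parts.flatten ++ (if run = [] then pvTp u runs t else pvRr u runs run t) := by
  intro t
  induction t with
  | nil =>
    intro parts run runs
    by_cases hr : run = []
    · simp [hr, pvTp]
    · simp [hr, pvRr]
  | cons c t' ih =>
    intro parts run runs
    simp only [List.foldl_cons]
    rw [pvStepB]
    simp only [pvIsDig_eq]
    by_cases hc : pvIsDigA c
    · rw [if_pos hc]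
      rw [ih parts (run ++ [c]) runs]
      rw [if_neg (by simp)]
      by_cases hr : run = []
      · subst hr
        simp [pvTp, hc]
      · rw [if_neg hr, pvRr, if_pos hc]
    · rw [if_neg hc]
      by_cases hr : run = []
      · subst hr
        simp only [ne_eq, not_true_eq_false, reduceIte]
        rw [ih (parts ++ [[c]]) [] runs]
        simp [pvTp, hc]
      · rw [show (if run ≠ [] then (parts ++ [if runs < u then run else ['*'], [c]], ([]:List Char), runs + 1)
              else (parts ++ [[c]], run, runs))
            = (parts ++ [if runs < u then run else ['*'], [c]], ([]:List Char), runs + 1)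
            from if_pos (by simpa using hr)]
        rw [ih _ [] (runs + 1)]
        rw [if_neg hr, pvRr, if_neg hc]
        by_cases hu : runs < u
        · simp [hu]
        · simp [hu]

-- ===== VERDICT (by name: the statement is the Claim_ definition above) =====
theorem wildcardHostname_spec : Claim_equal_wildcardHostname := by
  intro hostname u _
  unfold Spec_wildcardHostname wildcardHostname wildcardHostname_alt
  have hA := (pvLoopA_spec u (2 * hostname.toList.length)).1 [] hostname.toList 0 (le_refl _)
  simp only [List.nil_append, List.length_nil, Nat.cast_zero] at hA
  have hB := pvFoldB_spec u hostname.toList [] [] 0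
  simp only [List.flatten_nil, List.nil_append, if_pos rfl] at hB
  rw [hA]
  simp only []
  rw [hB]
  simp
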